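-- pv_equiv track=rewrite | github.com/jayant0709/Team-121-HEL-8-AIML-Hackathon- | feedback/views.py | analyze_reviews
-- ===== SOURCE A (Python) =====
-- def analyze_reviews(data):
--     sentiments = [
--         'question_1_sentiment', 'question_2_sentiment', 'question_3_sentiment',
--         'question_4_sentiment', 'question_5_sentiment'
--     ]
--
--     sentiment_counts = {question: {"Positive": 0, "Negative": 0, "Not analyzed": 0} for question in sentiments}
--
--     for record in data:
--         for question in sentiments:
--             sentiment = record.get(question)
--             if sentiment in sentiment_counts[question]:
--                 sentiment_counts[question][sentiment] += 1
--
--     result = [[sentiment_counts[question]["Positive"], sentiment_counts[question]["Negative"], sentiment_counts[question]["Not analyzed"]] for question in sentiments]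
--
--     return result
-- ===== SOURCE B (Python) =====
-- QUESTIONS = ['question_1_sentiment', 'question_2_sentiment', 'question_3_sentiment',
--              'question_4_sentiment', 'question_5_sentiment']
--
--
-- def _indicator(record):
--     # 5x3 0/1 matrix: row per question, columns (Positive, Negative, Not analyzed)
--     rows = []
--     for q in QUESTIONS:
--         v = record.get(q)
--         rows.append([1 if v == 'Positive' else 0,
--                      1 if v == 'Negative' else 0,
--                      1 if v == 'Not analyzed' else 0])
--     return rows
--
--
-- def _madd(m1, m2):
--     return [[x + y for x, y in zip(r1, r2)] for r1, r2 in zip(m1, m2)]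
--
--
-- def analyze_reviews(data):
--     # map each record to an indicator matrix, then reduce by elementwise matrix addition
--     totals = [[0, 0, 0] for _ in QUESTIONS]
--     for record in data:
--         totals = _madd(totals, _indicator(record))
--     return totals
-- ===== Notes on version B (the rewrite author's own statement) =====
-- stated objective: alternative
-- what changed: Replaced the nested dict-of-dicts tally with membership tests by a map-reduce: each record is mapped to a 5x3 0/1 indicator matrix and the result is the elementwise matrix sum of these, built as a purely functional fold instead of in-place dict updates.
import Mathlib
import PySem

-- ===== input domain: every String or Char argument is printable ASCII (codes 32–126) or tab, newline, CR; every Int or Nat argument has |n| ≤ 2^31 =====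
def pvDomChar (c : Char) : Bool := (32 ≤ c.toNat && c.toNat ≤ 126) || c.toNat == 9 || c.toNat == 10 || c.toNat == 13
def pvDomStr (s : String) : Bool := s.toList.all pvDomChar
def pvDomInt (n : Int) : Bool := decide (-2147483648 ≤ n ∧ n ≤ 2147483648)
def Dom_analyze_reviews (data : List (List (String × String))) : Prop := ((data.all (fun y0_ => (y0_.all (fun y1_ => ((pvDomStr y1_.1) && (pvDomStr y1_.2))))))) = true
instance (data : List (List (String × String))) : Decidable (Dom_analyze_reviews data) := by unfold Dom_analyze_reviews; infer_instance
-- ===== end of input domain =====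

-- B replaces A's in-place dict-of-dicts tally by a map-reduce: each record becomes a 5x3
-- 0/1 indicator matrix and the result is the elementwise matrix sum (objective: alternative).

-- ===== PORT A =====
def aQuestions : List String :=
  ["question_1_sentiment", "question_2_sentiment", "question_3_sentiment",
   "question_4_sentiment", "question_5_sentiment"]

-- one iteration of A's inner `for question in sentiments` body
def aStep (record : List (String × String))
    (cs : PySem.Dict String (PySem.Dict String Int)) (q : String) :
    PySem.Dict String (PySem.Dict String Int) :=
  match (PySem.Dict.mk record).get? q with
  | none => cs          -- record.get(question) is None: `None in sentiment_counts[question]` is False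
  | some s =>
      if (cs.getD q PySem.Dict.empty).contains s then
        cs.modify q PySem.Dict.empty (fun inner => inner.modify s 0 (· + 1))
      else cs

def analyze_reviews (data : List (List (String × String))) : List (List Int) :=
  let init : PySem.Dict String (PySem.Dict String Int) :=
    aQuestions.foldl
      (fun d q => d.insert q
        (((PySem.Dict.empty.insert "Positive" (0 : Int)).insert "Negative" 0).insert "Not analyzed" 0))
      PySem.Dict.empty
  let counts := data.foldl (fun cs record => aQuestions.foldl (aStep record) cs) init
  aQuestions.map (fun q =>
    [(counts.getD q PySem.Dict.empty).getD "Positive" 0,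
     (counts.getD q PySem.Dict.empty).getD "Negative" 0,
     (counts.getD q PySem.Dict.empty).getD "Not analyzed" 0])

-- ===== PORT B =====
def bQuestions : List String :=
  ["question_1_sentiment", "question_2_sentiment", "question_3_sentiment",
   "question_4_sentiment", "question_5_sentiment"]

-- Source B's _indicator: 5x3 0/1 matrix of one record
def bIndicator (record : List (String × String)) : List (List Int) :=
  bQuestions.map (fun q =>
    let v := (PySem.Dict.mk record).get? q
    [if v = some "Positive" then (1 : Int) else 0,
     if v = some "Negative" then (1 : Int) else 0,
     if v = some "Not analyzed" then (1 : Int) else 0])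

-- Source B's _madd: elementwise addition via zip
def bMadd (m1 m2 : List (List Int)) : List (List Int) :=
  (m1.zip m2).map (fun p => (p.1.zip p.2).map (fun q => q.1 + q.2))

def analyze_reviews_alt (data : List (List (String × String))) : List (List Int) :=
  data.foldl (fun totals record => bMadd totals (bIndicator record))
    (bQuestions.map (fun _ => [0, 0, 0]))

-- ===== PRECONDITION & SPEC =====
def Spec_analyze_reviews (data : List (List (String × String))) (out : List (List Int)) : Prop := out = analyze_reviews_alt data
instance (data : List (List (String × String))) (out : List (List Int)) : Decidable (Spec_analyze_reviews data out) := by unfold Spec_analyze_reviews; infer_instance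

-- ===== CLAIM (what is proved, stated in full; the proofs are below) =====
def Claim_equal_analyze_reviews : Prop := ∀ (data : List (List (String × String))), Dom_analyze_reviews data → Spec_analyze_reviews data (analyze_reviews data)

-- ===== LEMMAS AND PROOFS =====

-- the shape of A's accumulator: 5 fixed question keys, each with the 3 fixed sentiment keys
def inner3 (p n na : Int) : PySem.Dict String Int :=
  PySem.Dict.mk [("Positive", p), ("Negative", n), ("Not analyzed", na)]

def S (a1 b1 c1 a2 b2 c2 a3 b3 c3 a4 b4 c4 a5 b5 c5 : Int) :
    PySem.Dict String (PySem.Dict String Int) :=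
  PySem.Dict.mk
    [("question_1_sentiment", inner3 a1 b1 c1),
     ("question_2_sentiment", inner3 a2 b2 c2),
     ("question_3_sentiment", inner3 a3 b3 c3),
     ("question_4_sentiment", inner3 a4 b4 c4),
     ("question_5_sentiment", inner3 a5 b5 c5)]

-- B's accumulator shape: an explicit 5x3 matrix
def M (a1 b1 c1 a2 b2 c2 a3 b3 c3 a4 b4 c4 a5 b5 c5 : Int) : List (List Int) :=
  [[a1, b1, c1], [a2, b2, c2], [a3, b3, c3], [a4, b4, c4], [a5, b5, c5]]

def cnt (r : List (String × String)) (q v : String) : Int :=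
  if (PySem.Dict.mk r).get? q = some v then 1 else 0

theorem step_q1 (r : List (String × String)) (a1 b1 c1 a2 b2 c2 a3 b3 c3 a4 b4 c4 a5 b5 c5 : Int) :
    aStep r (S a1 b1 c1 a2 b2 c2 a3 b3 c3 a4 b4 c4 a5 b5 c5) "question_1_sentiment" =
    S (a1 + cnt r "question_1_sentiment" "Positive") (b1 + cnt r "question_1_sentiment" "Negative") (c1 + cnt r "question_1_sentiment" "Not analyzed") a2 b2 c2 a3 b3 c3 a4 b4 c4 a5 b5 c5 := by
  unfold aStep
  cases h : (PySem.Dict.mk r).get? "question_1_sentiment" with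
  | none => simp [h, cnt]
  | some s =>
    have c1 : cnt r "question_1_sentiment" "Positive" = (if s = "Positive" then (1:Int) else 0) := by
      simp [cnt, h]
    have c2 : cnt r "question_1_sentiment" "Negative" = (if s = "Negative" then (1:Int) else 0) := by
      simp [cnt, h]
    have c3 : cnt r "question_1_sentiment" "Not analyzed" = (if s = "Not analyzed" then (1:Int) else 0) := by
      simp [cnt, h]
    rw [c1, c2, c3]
    by_cases hp : s = "Positive"
    · subst hp
      simp [S, inner3, PySem.Dict.modify, PySem.Dict.insert, PySem.Dict.contains,
            PySem.Dict.getD, PySem.Dict.get?, PySem.Dict.empty]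
    · by_cases hn : s = "Negative"
      · subst hn
        simp [S, inner3, PySem.Dict.modify, PySem.Dict.insert, PySem.Dict.contains,
              PySem.Dict.getD, PySem.Dict.get?, PySem.Dict.empty]
      · by_cases hna : s = "Not analyzed"
        · subst hna
          simp [S, inner3, PySem.Dict.modify, PySem.Dict.insert, PySem.Dict.contains,
                PySem.Dict.getD, PySem.Dict.get?, PySem.Dict.empty]
        · simp [S, inner3, PySem.Dict.contains, PySem.Dict.getD, PySem.Dict.get?,
                PySem.Dict.empty, Ne.symm hp, Ne.symm hn, Ne.symm hna, hp, hn, hna]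

theorem step_q2 (r : List (String × String)) (a1 b1 c1 a2 b2 c2 a3 b3 c3 a4 b4 c4 a5 b5 c5 : Int) :
    aStep r (S a1 b1 c1 a2 b2 c2 a3 b3 c3 a4 b4 c4 a5 b5 c5) "question_2_sentiment" =
    S a1 b1 c1 (a2 + cnt r "question_2_sentiment" "Positive") (b2 + cnt r "question_2_sentiment" "Negative") (c2 + cnt r "question_2_sentiment" "Not analyzed") a3 b3 c3 a4 b4 c4 a5 b5 c5 := by
  unfold aStep
  cases h : (PySem.Dict.mk r).get? "question_2_sentiment" with
  | none => simp [h, cnt]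
  | some s =>
    have c1 : cnt r "question_2_sentiment" "Positive" = (if s = "Positive" then (1:Int) else 0) := by
      simp [cnt, h]
    have c2 : cnt r "question_2_sentiment" "Negative" = (if s = "Negative" then (1:Int) else 0) := by
      simp [cnt, h]
    have c3 : cnt r "question_2_sentiment" "Not analyzed" = (if s = "Not analyzed" then (1:Int) else 0) := by
      simp [cnt, h]
    rw [c1, c2, c3]
    by_cases hp : s = "Positive"
    · subst hp
      simp [S, inner3, PySem.Dict.modify, PySem.Dict.insert, PySem.Dict.contains,
            PySem.Dict.getD, PySem.Dict.get?, PySem.Dict.empty]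
    · by_cases hn : s = "Negative"
      · subst hn
        simp [S, inner3, PySem.Dict.modify, PySem.Dict.insert, PySem.Dict.contains,
              PySem.Dict.getD, PySem.Dict.get?, PySem.Dict.empty]
      · by_cases hna : s = "Not analyzed"
        · subst hna
          simp [S, inner3, PySem.Dict.modify, PySem.Dict.insert, PySem.Dict.contains,
                PySem.Dict.getD, PySem.Dict.get?, PySem.Dict.empty]
        · simp [S, inner3, PySem.Dict.contains, PySem.Dict.getD, PySem.Dict.get?,
                PySem.Dict.empty, Ne.symm hp, Ne.symm hn, Ne.symm hna, hp, hn, hna]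

theorem step_q3 (r : List (String × String)) (a1 b1 c1 a2 b2 c2 a3 b3 c3 a4 b4 c4 a5 b5 c5 : Int) :
    aStep r (S a1 b1 c1 a2 b2 c2 a3 b3 c3 a4 b4 c4 a5 b5 c5) "question_3_sentiment" =
    S a1 b1 c1 a2 b2 c2 (a3 + cnt r "question_3_sentiment" "Positive") (b3 + cnt r "question_3_sentiment" "Negative") (c3 + cnt r "question_3_sentiment" "Not analyzed") a4 b4 c4 a5 b5 c5 := by
  unfold aStep
  cases h : (PySem.Dict.mk r).get? "question_3_sentiment" with
  | none => simp [h, cnt]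
  | some s =>
    have c1 : cnt r "question_3_sentiment" "Positive" = (if s = "Positive" then (1:Int) else 0) := by
      simp [cnt, h]
    have c2 : cnt r "question_3_sentiment" "Negative" = (if s = "Negative" then (1:Int) else 0) := by
      simp [cnt, h]
    have c3 : cnt r "question_3_sentiment" "Not analyzed" = (if s = "Not analyzed" then (1:Int) else 0) := by
      simp [cnt, h]
    rw [c1, c2, c3]
    by_cases hp : s = "Positive"
    · subst hp
      simp [S, inner3, PySem.Dict.modify, PySem.Dict.insert, PySem.Dict.contains,
            PySem.Dict.getD, PySem.Dict.get?, PySem.Dict.empty]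
    · by_cases hn : s = "Negative"
      · subst hn
        simp [S, inner3, PySem.Dict.modify, PySem.Dict.insert, PySem.Dict.contains,
              PySem.Dict.getD, PySem.Dict.get?, PySem.Dict.empty]
      · by_cases hna : s = "Not analyzed"
        · subst hna
          simp [S, inner3, PySem.Dict.modify, PySem.Dict.insert, PySem.Dict.contains,
                PySem.Dict.getD, PySem.Dict.get?, PySem.Dict.empty]
        · simp [S, inner3, PySem.Dict.contains, PySem.Dict.getD, PySem.Dict.get?,
                PySem.Dict.empty, Ne.symm hp, Ne.symm hn, Ne.symm hna, hp, hn, hna]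

theorem step_q4 (r : List (String × String)) (a1 b1 c1 a2 b2 c2 a3 b3 c3 a4 b4 c4 a5 b5 c5 : Int) :
    aStep r (S a1 b1 c1 a2 b2 c2 a3 b3 c3 a4 b4 c4 a5 b5 c5) "question_4_sentiment" =
    S a1 b1 c1 a2 b2 c2 a3 b3 c3 (a4 + cnt r "question_4_sentiment" "Positive") (b4 + cnt r "question_4_sentiment" "Negative") (c4 + cnt r "question_4_sentiment" "Not analyzed") a5 b5 c5 := by
  unfold aStep
  cases h : (PySem.Dict.mk r).get? "question_4_sentiment" with
  | none => simp [h, cnt]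
  | some s =>
    have c1 : cnt r "question_4_sentiment" "Positive" = (if s = "Positive" then (1:Int) else 0) := by
      simp [cnt, h]
    have c2 : cnt r "question_4_sentiment" "Negative" = (if s = "Negative" then (1:Int) else 0) := by
      simp [cnt, h]
    have c3 : cnt r "question_4_sentiment" "Not analyzed" = (if s = "Not analyzed" then (1:Int) else 0) := by
      simp [cnt, h]
    rw [c1, c2, c3]
    by_cases hp : s = "Positive"
    · subst hp
      simp [S, inner3, PySem.Dict.modify, PySem.Dict.insert, PySem.Dict.contains,
            PySem.Dict.getD, PySem.Dict.get?, PySem.Dict.empty]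
    · by_cases hn : s = "Negative"
      · subst hn
        simp [S, inner3, PySem.Dict.modify, PySem.Dict.insert, PySem.Dict.contains,
              PySem.Dict.getD, PySem.Dict.get?, PySem.Dict.empty]
      · by_cases hna : s = "Not analyzed"
        · subst hna
          simp [S, inner3, PySem.Dict.modify, PySem.Dict.insert, PySem.Dict.contains,
                PySem.Dict.getD, PySem.Dict.get?, PySem.Dict.empty]
        · simp [S, inner3, PySem.Dict.contains, PySem.Dict.getD, PySem.Dict.get?,
                PySem.Dict.empty, Ne.symm hp, Ne.symm hn, Ne.symm hna, hp, hn, hna]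

theorem step_q5 (r : List (String × String)) (a1 b1 c1 a2 b2 c2 a3 b3 c3 a4 b4 c4 a5 b5 c5 : Int) :
    aStep r (S a1 b1 c1 a2 b2 c2 a3 b3 c3 a4 b4 c4 a5 b5 c5) "question_5_sentiment" =
    S a1 b1 c1 a2 b2 c2 a3 b3 c3 a4 b4 c4 (a5 + cnt r "question_5_sentiment" "Positive") (b5 + cnt r "question_5_sentiment" "Negative") (c5 + cnt r "question_5_sentiment" "Not analyzed") := by
  unfold aStep
  cases h : (PySem.Dict.mk r).get? "question_5_sentiment" with
  | none => simp [h, cnt]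
  | some s =>
    have c1 : cnt r "question_5_sentiment" "Positive" = (if s = "Positive" then (1:Int) else 0) := by
      simp [cnt, h]
    have c2 : cnt r "question_5_sentiment" "Negative" = (if s = "Negative" then (1:Int) else 0) := by
      simp [cnt, h]
    have c3 : cnt r "question_5_sentiment" "Not analyzed" = (if s = "Not analyzed" then (1:Int) else 0) := by
      simp [cnt, h]
    rw [c1, c2, c3]
    by_cases hp : s = "Positive"
    · subst hp
      simp [S, inner3, PySem.Dict.modify, PySem.Dict.insert, PySem.Dict.contains,
            PySem.Dict.getD, PySem.Dict.get?, PySem.Dict.empty]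
    · by_cases hn : s = "Negative"
      · subst hn
        simp [S, inner3, PySem.Dict.modify, PySem.Dict.insert, PySem.Dict.contains,
              PySem.Dict.getD, PySem.Dict.get?, PySem.Dict.empty]
      · by_cases hna : s = "Not analyzed"
        · subst hna
          simp [S, inner3, PySem.Dict.modify, PySem.Dict.insert, PySem.Dict.contains,
                PySem.Dict.getD, PySem.Dict.get?, PySem.Dict.empty]
        · simp [S, inner3, PySem.Dict.contains, PySem.Dict.getD, PySem.Dict.get?,
                PySem.Dict.empty, Ne.symm hp, Ne.symm hn, Ne.symm hna, hp, hn, hna]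

theorem record_step (r : List (String × String)) (a1 b1 c1 a2 b2 c2 a3 b3 c3 a4 b4 c4 a5 b5 c5 : Int) :
    aQuestions.foldl (aStep r) (S a1 b1 c1 a2 b2 c2 a3 b3 c3 a4 b4 c4 a5 b5 c5) =
    S (a1 + cnt r "question_1_sentiment" "Positive") (b1 + cnt r "question_1_sentiment" "Negative") (c1 + cnt r "question_1_sentiment" "Not analyzed") (a2 + cnt r "question_2_sentiment" "Positive") (b2 + cnt r "question_2_sentiment" "Negative") (c2 + cnt r "question_2_sentiment" "Not analyzed") (a3 + cnt r "question_3_sentiment" "Positive") (b3 + cnt r "question_3_sentiment" "Negative") (c3 + cnt r "question_3_sentiment" "Not analyzed") (a4 + cnt r "question_4_sentiment" "Positive") (b4 + cnt r "question_4_sentiment" "Negative") (c4 + cnt r "question_4_sentiment" "Not analyzed") (a5 + cnt r "question_5_sentiment" "Positive") (b5 + cnt r "question_5_sentiment" "Negative") (c5 + cnt r "question_5_sentiment" "Not analyzed") := by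
  simp only [aQuestions, List.foldl]
  rw [step_q1, step_q2, step_q3, step_q4, step_q5]

-- B's indicator matrix written in the M shape
theorem bIndicator_eq (r : List (String × String)) :
    bIndicator r =
    M (cnt r "question_1_sentiment" "Positive") (cnt r "question_1_sentiment" "Negative") (cnt r "question_1_sentiment" "Not analyzed") (cnt r "question_2_sentiment" "Positive") (cnt r "question_2_sentiment" "Negative") (cnt r "question_2_sentiment" "Not analyzed") (cnt r "question_3_sentiment" "Positive") (cnt r "question_3_sentiment" "Negative") (cnt r "question_3_sentiment" "Not analyzed") (cnt r "question_4_sentiment" "Positive") (cnt r "question_4_sentiment" "Negative") (cnt r "question_4_sentiment" "Not analyzed") (cnt r "question_5_sentiment" "Positive") (cnt r "question_5_sentiment" "Negative") (cnt r "question_5_sentiment" "Not analyzed") := by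
  simp [bIndicator, bQuestions, M, cnt]

theorem bMadd_M (a1 b1 c1 a2 b2 c2 a3 b3 c3 a4 b4 c4 a5 b5 c5 x1 y1 z1 x2 y2 z2 x3 y3 z3 x4 y4 z4 x5 y5 z5 : Int) :
    bMadd (M a1 b1 c1 a2 b2 c2 a3 b3 c3 a4 b4 c4 a5 b5 c5) (M x1 y1 z1 x2 y2 z2 x3 y3 z3 x4 y4 z4 x5 y5 z5) =
    M (a1 + x1) (b1 + y1) (c1 + z1) (a2 + x2) (b2 + y2) (c2 + z2) (a3 + x3) (b3 + y3) (c3 + z3) (a4 + x4) (b4 + y4) (c4 + z4) (a5 + x5) (b5 + y5) (c5 + z5) := by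
  simp [bMadd, M]

def cntL (data : List (List (String × String))) (q v : String) : Int :=
  (data.map (fun r => cnt r q v)).sum

theorem cntL_nil (q v : String) : cntL [] q v = 0 := by
  simp [cntL]

theorem cntL_cons (r : List (String × String)) (data : List (List (String × String)))
    (q v : String) : cntL (r :: data) q v = cnt r q v + cntL data q v := by
  simp [cntL]

theorem fold_data_a (data : List (List (String × String))) :
    ∀ (a1 b1 c1 a2 b2 c2 a3 b3 c3 a4 b4 c4 a5 b5 c5 : Int),
    data.foldl (fun cs record => aQuestions.foldl (aStep record) cs) (S a1 b1 c1 a2 b2 c2 a3 b3 c3 a4 b4 c4 a5 b5 c5) =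
    S (a1 + cntL data "question_1_sentiment" "Positive") (b1 + cntL data "question_1_sentiment" "Negative") (c1 + cntL data "question_1_sentiment" "Not analyzed") (a2 + cntL data "question_2_sentiment" "Positive") (b2 + cntL data "question_2_sentiment" "Negative") (c2 + cntL data "question_2_sentiment" "Not analyzed") (a3 + cntL data "question_3_sentiment" "Positive") (b3 + cntL data "question_3_sentiment" "Negative") (c3 + cntL data "question_3_sentiment" "Not analyzed") (a4 + cntL data "question_4_sentiment" "Positive") (b4 + cntL data "question_4_sentiment" "Negative") (c4 + cntL data "question_4_sentiment" "Not analyzed") (a5 + cntL data "question_5_sentiment" "Positive") (b5 + cntL data "question_5_sentiment" "Negative") (c5 + cntL data "question_5_sentiment" "Not analyzed") := by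
  induction data with
  | nil => intro a1 b1 c1 a2 b2 c2 a3 b3 c3 a4 b4 c4 a5 b5 c5; simp [cntL_nil]
  | cons r data ih =>
    intro a1 b1 c1 a2 b2 c2 a3 b3 c3 a4 b4 c4 a5 b5 c5
    rw [List.foldl_cons, record_step, ih]
    simp only [cntL_cons]
    ring_nf

theorem fold_data_b (data : List (List (String × String))) :
    ∀ (a1 b1 c1 a2 b2 c2 a3 b3 c3 a4 b4 c4 a5 b5 c5 : Int),
    data.foldl (fun totals record => bMadd totals (bIndicator record)) (M a1 b1 c1 a2 b2 c2 a3 b3 c3 a4 b4 c4 a5 b5 c5) =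
    M (a1 + cntL data "question_1_sentiment" "Positive") (b1 + cntL data "question_1_sentiment" "Negative") (c1 + cntL data "question_1_sentiment" "Not analyzed") (a2 + cntL data "question_2_sentiment" "Positive") (b2 + cntL data "question_2_sentiment" "Negative") (c2 + cntL data "question_2_sentiment" "Not analyzed") (a3 + cntL data "question_3_sentiment" "Positive") (b3 + cntL data "question_3_sentiment" "Negative") (c3 + cntL data "question_3_sentiment" "Not analyzed") (a4 + cntL data "question_4_sentiment" "Positive") (b4 + cntL data "question_4_sentiment" "Negative") (c4 + cntL data "question_4_sentiment" "Not analyzed") (a5 + cntL data "question_5_sentiment" "Positive") (b5 + cntL data "question_5_sentiment" "Negative") (c5 + cntL data "question_5_sentiment" "Not analyzed") := by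
  induction data with
  | nil => intro a1 b1 c1 a2 b2 c2 a3 b3 c3 a4 b4 c4 a5 b5 c5; simp [cntL_nil]
  | cons r data ih =>
    intro a1 b1 c1 a2 b2 c2 a3 b3 c3 a4 b4 c4 a5 b5 c5
    rw [List.foldl_cons, bIndicator_eq, bMadd_M, ih]
    simp only [cntL_cons]
    ring_nf

-- ===== VERDICT (by name: the statement is the Claim_ definition above) =====
theorem analyze_reviews_spec : Claim_equal_analyze_reviews := by
  intro data _
  unfold Spec_analyze_reviews analyze_reviews analyze_reviews_alt
  have hinit : (aQuestions.foldl
      (fun d q => d.insert q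
        (((PySem.Dict.empty.insert "Positive" (0 : Int)).insert "Negative" 0).insert "Not analyzed" 0))
      PySem.Dict.empty) = S 0 0 0 0 0 0 0 0 0 0 0 0 0 0 0 := by decide
  have hinitb : (bQuestions.map (fun _ => ([0, 0, 0] : List Int))) = M 0 0 0 0 0 0 0 0 0 0 0 0 0 0 0 := by decide
  simp only [hinit, hinitb, fold_data_a, fold_data_b]
  simp [aQuestions, S, inner3, M, PySem.Dict.getD, PySem.Dict.get?]
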